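-- pv_equiv track=rewrite | github.com/khuushichand/aiml-project | tldw_Server_API/app/api/v1/endpoints/notes.py | _extract_markdown_frontmatter_keywords
-- ===== SOURCE A (Python) =====
-- from typing import Any, Callable, Optional, TypeVar
--
-- def _parse_keyword_tokens_inline(value: str) -> list[str]:
--     raw = value.strip()
--     if raw.startswith("[") and raw.endswith("]"):
--         raw = raw[1:-1]
--     if not raw:
--         return []
--     out: list[str] = []
--     for part in raw.split(","):
--         token = part.strip().strip('"').strip("'")
--         if token:
--             out.append(token)
--     return out
--
-- def _normalize_import_keywords(raw_keywords: Any) -> list[str]: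
--     if raw_keywords is None:
--         return []
--     tokens: list[str] = []
--     if isinstance(raw_keywords, str):
--         tokens.extend(_parse_keyword_tokens_inline(raw_keywords))
--     elif isinstance(raw_keywords, list):
--         for item in raw_keywords:
--             text = _keyword_text_from_row(item)
--             if text:
--                 tokens.append(text)
--     elif isinstance(raw_keywords, dict):
--         maybe = raw_keywords.get("keywords")
--         if maybe is not None:
--             return _normalize_import_keywords(maybe)
--     deduped: list[str] = []
--     seen: set[str] = set()
--     for token in tokens:
--         key = token.lower()
--         if key in seen:
--             continue
--         seen.add(key)
--         deduped.append(token)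
--     return deduped
--
-- def _extract_markdown_frontmatter_keywords(text: str) -> tuple[list[str], str]:
--     normalized = text.replace("\r\n", "\n").lstrip("\ufeff")
--     lines = normalized.split("\n")
--     if not lines or lines[0].strip() != "---":
--         return [], normalized
--
--     end_index = None
--     for idx in range(1, min(len(lines), 2000)):
--         if lines[idx].strip() == "---":
--             end_index = idx
--             break
--     if end_index is None:
--         return [], normalized
--
--     keywords: list[str] = []
--     frontmatter_lines = lines[1:end_index]
--     idx = 0
--     while idx < len(frontmatter_lines):
--         stripped = frontmatter_lines[idx].strip()
--         lower = stripped.lower()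
--         if lower.startswith("tags:") or lower.startswith("keywords:"):
--             _, _, value = stripped.partition(":")
--             inline_value = value.strip()
--             if inline_value:
--                 keywords.extend(_parse_keyword_tokens_inline(inline_value))
--             else:
--                 idx += 1
--                 while idx < len(frontmatter_lines):
--                     nested = frontmatter_lines[idx].strip()
--                     if not nested.startswith("-"):
--                         idx -= 1
--                         break
--                     token = nested[1:].strip().strip('"').strip("'")
--                     if token:
--                         keywords.append(token)
--                     idx += 1
--         idx += 1
--
--     deduped = _normalize_import_keywords(keywords)
--     body = "\n".join(lines[end_index + 1 :])
--     return deduped, body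
--
-- def _normalize_keyword_text(value: Any) -> Optional[str]:
--     if value is None:
--         return None
--     text = str(value).strip()
--     return text or None
--
-- def _keyword_text_from_row(row: Any) -> Optional[str]:
--     if isinstance(row, dict):
--         for key in ("keyword", "keyword_text", "text"):
--             if key in row:
--                 return _normalize_keyword_text(row.get(key))
--     return _normalize_keyword_text(row)
-- ===== SOURCE B (Python) =====
-- # B: processes the frontmatter BACK-TO-FRONT in one reversed pass (a dash-run's
-- # tokens are flushed when the header directly above it is reached), instead of
-- # A's forward while-loop with a nested inner loop and index backtracking; the
-- # strip+dedup post-pass is merged into one pass. Objective: alternative.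
--
-- def _parse_keyword_tokens_inline(value):
--     raw = value.strip()
--     if raw.startswith("[") and raw.endswith("]"):
--         raw = raw[1:-1]
--     if not raw:
--         return []
--     out = []
--     for part in raw.split(","):
--         token = part.strip().strip('"').strip("'")
--         if token:
--             out.append(token)
--     return out
--
-- def _extract_markdown_frontmatter_keywords(text):
--     normalized = text.replace("\r\n", "\n").lstrip("\ufeff")
--     lines = normalized.split("\n")
--     if lines[0].strip() != "---":
--         return [], normalized
--     end_index = next(
--         (pos for pos, line in enumerate(lines[1:2000], 1) if line.strip() == "---"),
--         None,
--     )
--     if end_index is None: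
--         return [], normalized
--     # reversed pass: 'pending' holds the tokens of the dash-run directly below
--     # the current line (in document order); a header line above flushes it.
--     result, pending = [], []
--     for line in reversed(lines[1:end_index]):
--         stripped = line.strip()
--         if stripped.startswith("-"):
--             token = stripped[1:].strip().strip('"').strip("'")
--             if token:
--                 pending = [token] + pending
--             continue
--         lower = stripped.lower()
--         if lower.startswith("tags:") or lower.startswith("keywords:"):
--             value = stripped.partition(":")[2].strip()
--             if value:
--                 result = _parse_keyword_tokens_inline(value) + result
--             else:
--                 result = pending + result
--         pending = []
--     deduped, seen = [], set()
--     for token in result: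
--         t = token.strip()
--         if t and t.lower() not in seen:
--             seen.add(t.lower())
--             deduped.append(t)
--     return deduped, "\n".join(lines[end_index + 1:])
-- ===== Notes on version B (the rewrite author's own statement) =====
-- stated objective: alternative
-- what changed: B collects tokens by traversing the frontmatter back-to-front in one reversed pass, carrying the pending dash-run and flushing it when the header line directly above it is reached (building the output back-to-front), instead of A's forward while-loop with a nested inner while and index backtracking; the strip+dedup post-pass is merged into one pass.
import Mathlib
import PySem

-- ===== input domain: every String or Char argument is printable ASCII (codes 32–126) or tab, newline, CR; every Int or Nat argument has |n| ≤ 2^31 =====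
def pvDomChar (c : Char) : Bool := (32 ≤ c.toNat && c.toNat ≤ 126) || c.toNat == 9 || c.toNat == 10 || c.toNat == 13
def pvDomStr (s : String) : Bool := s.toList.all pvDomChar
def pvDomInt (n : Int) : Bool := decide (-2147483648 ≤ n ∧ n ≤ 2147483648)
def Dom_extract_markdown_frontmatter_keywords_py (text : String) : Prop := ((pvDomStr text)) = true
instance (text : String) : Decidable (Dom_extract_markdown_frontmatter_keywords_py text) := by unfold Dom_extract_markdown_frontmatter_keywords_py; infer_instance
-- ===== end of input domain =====

-- B processes the frontmatter back-to-front in one reversed pass (a dash-run's tokens are flushed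
-- when the header directly above it is reached) instead of A's forward while-loop with a nested
-- inner loop and index backtracking, and merges the strip+dedup post-pass; objective: alternative.

-- ===== PORT A =====

-- "---"
def pvDash : List Char := ['-', '-', '-']

-- third component of stripped.partition(":"): everything after the first ':' (exact: '' when ':' absent)
def pvAfterColon (s : List Char) : List Char :=
  let i := PySem.Chars.find s [':']
  if i = -1 then [] else s.drop (i.toNat + 1)

-- nested[1:].strip().strip('"').strip("'")   (token of a "- item" line, shared by both Pythons)
def pvToken (nested : List Char) : List Char :=
  PySem.Chars.stripChars (PySem.Chars.stripChars (PySem.Chars.strip (nested.drop 1)) ['"']) ['\'']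

-- _parse_keyword_tokens_inline (module helper used verbatim by both Pythons)
def pvParseInline (value : List Char) : List (List Char) :=
  let raw := PySem.Chars.strip value
  let raw := if PySem.Chars.startswith raw ['['] && PySem.Chars.endswith raw [']']
             then PySem.List.slice raw (some 1) (some (-1)) else raw
  if raw = [] then []
  else (PySem.Chars.splitOn raw [',']).foldl (fun acc part =>
    let token := PySem.Chars.stripChars (PySem.Chars.stripChars (PySem.Chars.strip part) ['"']) ['\'']
    if token ≠ [] then acc ++ [token] else acc) []

-- A's 'for idx in range(1, min(len(lines), 2000)): if lines[idx].strip() == "---": break'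
def pvFindDash : List Int → List (List Char) → Option Int
  | [], _ => none
  | i :: rest, lines =>
      if PySem.Chars.strip (PySem.List.pyGetD lines i []) = pvDash then some i
      else pvFindDash rest lines

-- A's inner 'while idx < len(frontmatter_lines): nested = …' (returns the final idx and keywords).
-- The extra Nat is a fuel bound only (the call sites pass more fuel than the loop can iterate).
def pvAInner (fl : List (List Char)) : Nat → Nat → List (List Char) → Nat × List (List Char)
  | 0, j, kw => (j, kw)
  | fuel + 1, j, kw =>
    if h : j < fl.length then
      let nested := PySem.Chars.strip fl[j]
      if ¬ PySem.Chars.startswith nested ['-'] then (j - 1, kw)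
      else
        let token := pvToken nested
        pvAInner fl fuel (j + 1) (if token ≠ [] then kw ++ [token] else kw)
    else (j, kw)

-- A's outer 'while idx < len(frontmatter_lines)' loop (same fuel convention)
def pvAOuter (fl : List (List Char)) : Nat → List (List Char) → Nat → List (List Char)
  | 0, kw, _ => kw
  | fuel + 1, kw, idx =>
    if h : idx < fl.length then
      let stripped := PySem.Chars.strip fl[idx]
      let lower := PySem.Chars.lower stripped
      if PySem.Chars.startswith lower ['t','a','g','s',':']
          || PySem.Chars.startswith lower ['k','e','y','w','o','r','d','s',':'] then
        let value := PySem.Chars.strip (pvAfterColon stripped)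
        if value ≠ [] then pvAOuter fl fuel (kw ++ pvParseInline value) (idx + 1)
        else
          let p := pvAInner fl (fl.length + 1) (idx + 1) kw
          pvAOuter fl fuel p.2 (p.1 + 1)
      else pvAOuter fl fuel kw (idx + 1)
    else kw

-- the dedup step of _normalize_import_keywords ('if key in seen: continue; seen.add; append')
def pvSeenStep (st : PySem.Set (List Char) × List (List Char)) (token : List Char) :
    PySem.Set (List Char) × List (List Char) :=
  let key := PySem.Chars.lower token
  if PySem.Set.contains st.1 key then st else (PySem.Set.add st.1 key, st.2 ++ [token])

-- _normalize_import_keywords on a list of strings: token-text pass, then dedup-by-lower pass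
def pvNormalizeA (keywords : List (List Char)) : List (List Char) :=
  let tokens := keywords.foldl (fun acc item =>
    let t := PySem.Chars.strip item
    if t ≠ [] then acc ++ [t] else acc) []
  (tokens.foldl pvSeenStep (PySem.Set.empty, [])).2

def extract_markdown_frontmatter_keywords_py (text : String) : List String × String :=
  -- lstrip("\ufeff") is dropWhile of that one char (exact: lstrip with a one-character set)
  let normalized := (PySem.Chars.replace text.toList ['\r', '\n'] ['\n']).dropWhile (fun c => c == '\ufeff')
  let lines := PySem.Chars.splitOn normalized ['\n']
  match lines with
  | [] => ([], String.ofList normalized)       -- 'if not lines' (split never returns [])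
  | l0 :: _ =>
    if PySem.Chars.strip l0 ≠ pvDash then ([], String.ofList normalized)
    else
      match pvFindDash (PySem.List.pyRange 1 (min (PySem.List.len lines) 2000) 1) lines with
      | none => ([], String.ofList normalized)
      | some e =>
        let fl := PySem.List.slice lines (some 1) (some e)
        let deduped := pvNormalizeA (pvAOuter fl (fl.length + 1) [] 0)
        (deduped.map String.ofList,
         String.ofList (PySem.Chars.join ['\n'] (PySem.List.slice lines (some (e + 1)) none)))

-- ===== PORT B =====

-- B's reversed-pass step: state (pending, result); 'for line in reversed(fl)' is a right fold,
-- so pvRevStep takes the LINE first and the state second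
def pvRevStep (line : List Char) (st : List (List Char) × List (List Char)) :
    List (List Char) × List (List Char) :=
  let stripped := PySem.Chars.strip line
  if PySem.Chars.startswith stripped ['-'] then
    let token := pvToken stripped
    (if token ≠ [] then token :: st.1 else st.1, st.2)
  else
    let lower := PySem.Chars.lower stripped
    if PySem.Chars.startswith lower ['t','a','g','s',':']
        || PySem.Chars.startswith lower ['k','e','y','w','o','r','d','s',':'] then
      let value := PySem.Chars.strip (pvAfterColon stripped)
      if value ≠ [] then ([], pvParseInline value ++ st.2) else ([], st.1 ++ st.2)
    else ([], st.2)

-- B's merged strip + dedup-by-lower single pass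
def pvBDedupStep (st : PySem.Set (List Char) × List (List Char)) (token : List Char) :
    PySem.Set (List Char) × List (List Char) :=
  let t := PySem.Chars.strip token
  if t = [] then st
  else
    let k := PySem.Chars.lower t
    if PySem.Set.contains st.1 k then st else (PySem.Set.add st.1 k, st.2 ++ [t])

def pvDedupB (keywords : List (List Char)) : List (List Char) :=
  (keywords.foldl pvBDedupStep (PySem.Set.empty, [])).2

def extract_markdown_frontmatter_keywords_py_alt (text : String) : List String × String :=
  let normalized := (PySem.Chars.replace text.toList ['\r', '\n'] ['\n']).dropWhile (fun c => c == '\ufeff')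
  let lines := PySem.Chars.splitOn normalized ['\n']
  match lines with
  | [] => ([], String.ofList normalized)
  | l0 :: rest =>
    if PySem.Chars.strip l0 ≠ pvDash then ([], String.ofList normalized)
    else
      -- next((pos for pos, line in enumerate(lines[1:2000], 1) if line.strip() == "---"), None)
      match (rest.take 1999).findIdx? (fun l => PySem.Chars.strip l = pvDash) with
      | none => ([], String.ofList normalized)
      | some k =>
        let fl := rest.take k                  -- lines[1:end_index]
        let deduped := pvDedupB ((fl.foldr pvRevStep ([], [])).2)   -- reversed pass, pending discarded
        (deduped.map String.ofList,
         String.ofList (PySem.Chars.join ['\n'] (rest.drop (k + 1))))   -- lines[end_index+1:]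

-- ===== PRECONDITION & SPEC =====
def Spec_extract_markdown_frontmatter_keywords_py (text : String) (out : List String × String) : Prop := out = extract_markdown_frontmatter_keywords_py_alt text
instance (text : String) (out : List String × String) : Decidable (Spec_extract_markdown_frontmatter_keywords_py text out) := by unfold Spec_extract_markdown_frontmatter_keywords_py; infer_instance

-- ===== CLAIM (what is proved, stated in full; the proofs are below) =====
def Claim_equal_extract_markdown_frontmatter_keywords_py : Prop := ∀ (text : String), Dom_extract_markdown_frontmatter_keywords_py text → Spec_extract_markdown_frontmatter_keywords_py text (extract_markdown_frontmatter_keywords_py text)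

-- ===== LEMMAS AND PROOFS =====

-- proof-only intermediate: A's while-pair flattened to a forward fold with an in-block flag
def pvBStep (st : Bool × List (List Char)) (line : List Char) : Bool × List (List Char) :=
  let stripped := PySem.Chars.strip line
  if st.1 && PySem.Chars.startswith stripped ['-'] then
    let token := pvToken stripped
    (true, if token ≠ [] then st.2 ++ [token] else st.2)
  else
    let lower := PySem.Chars.lower stripped
    if PySem.Chars.startswith lower ['t','a','g','s',':']
        || PySem.Chars.startswith lower ['k','e','y','w','o','r','d','s',':'] then
      let value := PySem.Chars.strip (pvAfterColon stripped)
      if value ≠ [] then (false, st.2 ++ pvParseInline value) else (true, st.2)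
    else (false, st.2)

-- A's break-at-"---" scan over range(j, M) equals findIdx? on the corresponding window, offset by j
theorem pv_find_aux (lines : List (List Char)) (M : Int) (hM : M ≤ PySem.List.len lines) :
    ∀ (n j : Nat), 1 ≤ j → (M - j).toNat ≤ n →
    pvFindDash (PySem.List.pyRange j M 1) lines
      = (((lines.drop j).take (M.toNat - j)).findIdx? (fun l => PySem.Chars.strip l = pvDash)).map
          (fun k => ((j : Int) + k)) := by
  intro n
  induction n with
  | zero =>
      intro j hj hn
      have hMj : M ≤ (j : Int) := by omega
      rw [PySem.List.pyRange_one_eq_nil hMj]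
      have : M.toNat - j = 0 := by omega
      simp [pvFindDash, this]
  | succ n ih =>
      intro j hj hn
      by_cases hlt : (j : Int) < M
      · rw [PySem.List.pyRange_one_cons hlt]
        have hjlen : j < lines.length := by
          have := PySem.List.len_eq lines; omega
        have hget : PySem.List.pyGetD lines (j : Int) [] = lines[j] := by
          simp [PySem.List.pyGetD_natCast, List.getElem?_eq_getElem hjlen]
        have hdrop : lines.drop j = lines[j] :: lines.drop (j + 1) := List.drop_eq_getElem_cons hjlen
        have htake : M.toNat - j = (M.toNat - (j + 1)) + 1 := by omega
        rw [pvFindDash, hget, hdrop, htake, List.take_succ_cons, List.findIdx?_cons]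
        by_cases hhit : PySem.Chars.strip lines[j] = pvDash
        · simp [hhit]
        · have hih := ih (j + 1) (by omega) (by omega)
          push_cast at hih
          rw [if_neg hhit, hih]
          simp only [decide_eq_true_eq, if_neg hhit]
          cases ((lines.drop (j + 1)).take (M.toNat - (j + 1))).findIdx?
              (fun l => PySem.Chars.strip l = pvDash) with
          | none => simp
          | some k => simp; ring
      · rw [PySem.List.pyRange_one_eq_nil (by omega)]
        have : M.toNat - j = 0 := by omega
        simp [pvFindDash, this]

-- A's outer/inner while-pair equals the flag fold: 'false' state ↔ outer loop position idx,
-- 'true' state ↔ inner loop position idx (resuming at the returned index + 1)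
theorem pv_outer_dead (fl : List (List Char)) (fo : Nat) (kw : List (List Char)) (idx : Nat)
    (h : fl.length ≤ idx) : pvAOuter fl fo kw idx = kw := by
  cases fo with
  | zero => rfl
  | succ fo => rw [pvAOuter, dif_neg (by omega)]

theorem pv_loop_aux :
    ∀ (n : Nat) (fl : List (List Char)) (idx : Nat), fl.length - idx ≤ n →
    (∀ kw fo, fl.length - idx ≤ fo → pvAOuter fl fo kw idx = ((fl.drop idx).foldl pvBStep (false, kw)).2) ∧
    (∀ kw fi fo, 1 ≤ idx → fl.length - idx < fi → fl.length - idx ≤ fo →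
        pvAOuter fl fo (pvAInner fl fi idx kw).2 ((pvAInner fl fi idx kw).1 + 1)
          = ((fl.drop idx).foldl pvBStep (true, kw)).2) := by
  intro n
  induction n with
  | zero =>
      intro fl idx hn
      have hdrop : fl.drop idx = [] := List.drop_eq_nil_of_le (by omega)
      constructor
      · intro kw fo _
        rw [pv_outer_dead fl fo kw idx (by omega), hdrop]; rfl
      · intro kw fi fo hj hfi hfo
        obtain ⟨fi', rfl⟩ : ∃ fi', fi = fi' + 1 := ⟨fi - 1, by omega⟩
        rw [pvAInner, dif_neg (by omega)]
        rw [pv_outer_dead fl fo kw (idx + 1) (by omega), hdrop]; rfl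
  | succ n ih =>
      intro fl idx hn
      by_cases h : idx < fl.length
      case neg =>
        have hdrop : fl.drop idx = [] := List.drop_eq_nil_of_le (by omega)
        constructor
        · intro kw fo _
          rw [pv_outer_dead fl fo kw idx (by omega), hdrop]; rfl
        · intro kw fi fo hj hfi hfo
          obtain ⟨fi', rfl⟩ : ∃ fi', fi = fi' + 1 := ⟨fi - 1, by omega⟩
          rw [pvAInner, dif_neg (by omega)]
          rw [pv_outer_dead fl fo kw (idx + 1) (by omega), hdrop]; rfl
      case pos =>
      have hdrop : fl.drop idx = fl[idx] :: fl.drop (idx + 1) := List.drop_eq_getElem_cons h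
      have hstepF : ∀ kw, pvBStep (false, kw) fl[idx] =
          (let stripped := PySem.Chars.strip fl[idx]
           let lower := PySem.Chars.lower stripped
           if PySem.Chars.startswith lower ['t','a','g','s',':']
               || PySem.Chars.startswith lower ['k','e','y','w','o','r','d','s',':'] then
             let value := PySem.Chars.strip (pvAfterColon stripped)
             if value ≠ [] then (false, kw ++ pvParseInline value) else (true, kw)
           else (false, kw)) := by
        intro kw; simp [pvBStep]
      have hL1 : ∀ kw fo, fl.length - idx ≤ fo →
          pvAOuter fl fo kw idx = ((fl.drop idx).foldl pvBStep (false, kw)).2 := by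
        intro kw fo hfo
        obtain ⟨fo', rfl⟩ : ∃ fo', fo = fo' + 1 := ⟨fo - 1, by omega⟩
        rw [pvAOuter, dif_pos h, hdrop, List.foldl_cons, hstepF]
        simp only []
        by_cases hhd : (PySem.Chars.startswith (PySem.Chars.lower (PySem.Chars.strip fl[idx])) ['t','a','g','s',':']
            || PySem.Chars.startswith (PySem.Chars.lower (PySem.Chars.strip fl[idx])) ['k','e','y','w','o','r','d','s',':']) = true
        · rw [if_pos hhd, if_pos hhd]
          by_cases hval : PySem.Chars.strip (pvAfterColon (PySem.Chars.strip fl[idx])) ≠ []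
          · rw [if_pos hval, if_pos hval]
            exact (ih fl (idx + 1) (by omega)).1 _ fo' (by omega)
          · rw [if_neg hval, if_neg hval]
            exact (ih fl (idx + 1) (by omega)).2 kw (fl.length + 1) fo' (by omega) (by omega) (by omega)
        · rw [if_neg hhd, if_neg hhd]
          exact (ih fl (idx + 1) (by omega)).1 kw fo' (by omega)
      refine ⟨hL1, ?_⟩
      intro kw fi fo hj hfi hfo
      obtain ⟨fi', rfl⟩ : ∃ fi', fi = fi' + 1 := ⟨fi - 1, by omega⟩
      rw [pvAInner, dif_pos h]
      by_cases hdash : PySem.Chars.startswith (PySem.Chars.strip fl[idx]) ['-'] = true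
      · rw [if_neg (by simp [hdash])]
        simp only []
        have hih := (ih fl (idx + 1) (by omega)).2
          (if pvToken (PySem.Chars.strip fl[idx]) ≠ [] then kw ++ [pvToken (PySem.Chars.strip fl[idx])] else kw)
          fi' fo (by omega) (by omega) (by omega)
        rw [hih, hdrop, List.foldl_cons]
        congr 1
        simp [pvBStep, hdash]
      · rw [if_pos (by simp [hdash])]
        simp only []
        have hidx : idx - 1 + 1 = idx := by omega
        rw [hidx, hL1 kw fo hfo, hdrop, List.foldl_cons, List.foldl_cons]
        congr 2
        simp [pvBStep, hdash]

theorem pv_loop_eq (fl : List (List Char)) (kw : List (List Char)) :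
    pvAOuter fl (fl.length + 1) kw 0 = (fl.foldl pvBStep (false, kw)).2 := by
  have := (pv_loop_aux fl.length fl 0 (by omega)).1 kw (fl.length + 1) (by omega)
  simpa using this

-- a line whose strip starts with '-' cannot pass the tags:/keywords: header test
theorem pv_dash_not_header (s : List Char) (h : PySem.Chars.startswith s ['-'] = true) :
    (PySem.Chars.startswith (PySem.Chars.lower s) ['t','a','g','s',':']
      || PySem.Chars.startswith (PySem.Chars.lower s) ['k','e','y','w','o','r','d','s',':']) = false := by
  obtain ⟨t, rfl⟩ := (PySem.Chars.startswith_iff s ['-']).mp h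
  simp only [Bool.or_eq_false_iff]
  constructor <;>
  · rw [Bool.eq_false_iff]
    intro hc
    obtain ⟨u, hu⟩ := (PySem.Chars.startswith_iff _ _).mp hc
    simp [PySem.Chars.lower, PySem.Chars.lowerChar] at hu
    exact absurd hu.1 (by decide)
  
-- the flag fold equals B's reversed (right) fold: 'false' discards the pending dash-run,
-- 'true' flushes it in front of the rest
theorem pv_flag_rev (fl : List (List Char)) : ∀ kw : List (List Char),
    (fl.foldl pvBStep (false, kw)).2 = kw ++ (fl.foldr pvRevStep ([], [])).2 ∧
    (fl.foldl pvBStep (true, kw)).2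
      = kw ++ (fl.foldr pvRevStep ([], [])).1 ++ (fl.foldr pvRevStep ([], [])).2 := by
  induction fl with
  | nil => intro kw; simp
  | cons x xs ih =>
      intro kw
      rw [List.foldr_cons, List.foldl_cons, List.foldl_cons]
      by_cases hdash : PySem.Chars.startswith (PySem.Chars.strip x) ['-'] = true
      · have hstepF : pvBStep (false, kw) x = (false, kw) := by
          simp [pvBStep, pv_dash_not_header _ hdash]
        have hrev : pvRevStep x (xs.foldr pvRevStep ([], []))
            = (if pvToken (PySem.Chars.strip x) ≠ [] then
                 pvToken (PySem.Chars.strip x) :: (xs.foldr pvRevStep ([], [])).1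
               else (xs.foldr pvRevStep ([], [])).1,
               (xs.foldr pvRevStep ([], [])).2) := by
          simp [pvRevStep, hdash]
        refine ⟨?_, ?_⟩
        · rw [hstepF, hrev, (ih kw).1]
        · have hstepT : pvBStep (true, kw) x
              = (true, if pvToken (PySem.Chars.strip x) ≠ [] then
                  kw ++ [pvToken (PySem.Chars.strip x)] else kw) := by
            simp [pvBStep, hdash]
          rw [hstepT, hrev, (ih _).2]
          by_cases ht : pvToken (PySem.Chars.strip x) ≠ [] <;> simp [ht]
      · have hboth : ∀ b, pvBStep (b, kw) x =
            (let lower := PySem.Chars.lower (PySem.Chars.strip x)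
             if PySem.Chars.startswith lower ['t','a','g','s',':']
                 || PySem.Chars.startswith lower ['k','e','y','w','o','r','d','s',':'] then
               let value := PySem.Chars.strip (pvAfterColon (PySem.Chars.strip x))
               if value ≠ [] then (false, kw ++ pvParseInline value) else (true, kw)
             else (false, kw)) := by
          intro b; cases b <;> simp [pvBStep, hdash]
        by_cases hhd : (PySem.Chars.startswith (PySem.Chars.lower (PySem.Chars.strip x)) ['t','a','g','s',':']
            || PySem.Chars.startswith (PySem.Chars.lower (PySem.Chars.strip x)) ['k','e','y','w','o','r','d','s',':']) = true
        · by_cases hval : PySem.Chars.strip (pvAfterColon (PySem.Chars.strip x)) ≠ []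
          · have hrev : pvRevStep x (xs.foldr pvRevStep ([], []))
                = ([], pvParseInline (PySem.Chars.strip (pvAfterColon (PySem.Chars.strip x)))
                    ++ (xs.foldr pvRevStep ([], [])).2) := by
              simp [pvRevStep, hdash, hhd, hval]
            constructor <;>
            · rw [hboth]
              simp only [hhd, if_true, if_pos hval, hrev]
              rw [(ih _).1]
              simp
          · have hrev : pvRevStep x (xs.foldr pvRevStep ([], []))
                = ([], (xs.foldr pvRevStep ([], [])).1 ++ (xs.foldr pvRevStep ([], [])).2) := by
              simp [pvRevStep, hdash, hhd]
              intro hc; exact absurd hc hval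
            constructor <;>
            · rw [hboth]
              simp only [hhd, if_true, if_neg hval, hrev]
              rw [(ih _).2]
              simp
        · have hrev : pvRevStep x (xs.foldr pvRevStep ([], []))
              = ([], (xs.foldr pvRevStep ([], [])).2) := by
            simp [pvRevStep, hdash, hhd]
          constructor <;>
          · rw [hboth]
            simp only [hhd, if_false, Bool.false_eq_true, hrev]
            rw [(ih _).1]
            try simp
  
theorem pv_rev_eq (fl : List (List Char)) :
    (fl.foldl pvBStep (false, [])).2 = (fl.foldr pvRevStep ([], [])).2 := by
  simpa using (pv_flag_rev fl []).1

-- A's two dedup passes fused into B's single pass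
theorem pv_dedup_aux (kws : List (List Char)) (st : PySem.Set (List Char) × List (List Char)) :
    ((kws.filter (fun x => decide (PySem.Chars.strip x ≠ []))).map PySem.Chars.strip).foldl
      pvSeenStep st = kws.foldl pvBDedupStep st := by
  induction kws generalizing st with
  | nil => rfl
  | cons x xs ih =>
      by_cases hx : PySem.Chars.strip x = []
      · rw [List.filter_cons_of_neg (by simp [hx]), List.foldl_cons,
          show pvBDedupStep st x = st from by simp [pvBDedupStep, hx], ih]
      · rw [List.filter_cons_of_pos (by simp [hx]), List.map_cons, List.foldl_cons, List.foldl_cons,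
          show pvSeenStep st (PySem.Chars.strip x) = pvBDedupStep st x from by
            simp [pvSeenStep, pvBDedupStep, hx], ih]

theorem pv_dedup_eq (kws : List (List Char)) : pvNormalizeA kws = pvDedupB kws := by
  unfold pvNormalizeA pvDedupB
  rw [PySem.List.foldl_append_ite (p := fun item => PySem.Chars.strip item ≠ []) (f := PySem.Chars.strip),
    List.nil_append]
  exact congrArg Prod.snd (pv_dedup_aux kws _)

-- take up to a clamp at the list's own length is take
theorem pv_take_min {α : Type} (xs : List α) (k : Nat) : xs.take (min xs.length k) = xs.take k := by
  rcases le_total xs.length k with hk | hk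
  · rw [min_eq_left hk, List.take_length, List.take_of_length_le hk]
  · rw [min_eq_right hk]

-- ===== VERDICT (by name: the statement is the Claim_ definition above) =====
theorem extract_markdown_frontmatter_keywords_py_spec : Claim_equal_extract_markdown_frontmatter_keywords_py := by
  unfold Claim_equal_extract_markdown_frontmatter_keywords_py
  intro text _
  unfold Spec_extract_markdown_frontmatter_keywords_py
  simp only [extract_markdown_frontmatter_keywords_py, extract_markdown_frontmatter_keywords_py_alt]
  cases hL : PySem.Chars.splitOn
      ((PySem.Chars.replace text.toList ['\r', '\n'] ['\n']).dropWhile (fun c => c == '\ufeff'))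
      ['\n'] with
  | nil => rfl
  | cons l0 rest =>
    dsimp only
    by_cases h0 : PySem.Chars.strip l0 = pvDash
    case neg => rw [if_pos h0, if_pos h0]
    case pos =>
    rw [if_neg (by simp [h0]), if_neg (by simp [h0])]
    have hlen : PySem.List.len (l0 :: rest) = (rest.length : Int) + 1 := by
      rw [PySem.List.len_eq, List.length_cons]; push_cast; ring
    have hM1 : (1 : Int) ≤ min (PySem.List.len (l0 :: rest)) 2000 := by
      rw [hlen]; omega
    have hfind := pv_find_aux (l0 :: rest) (min (PySem.List.len (l0 :: rest)) 2000)
      (min_le_left _ _) ((min (PySem.List.len (l0 :: rest)) 2000 - 1).toNat) 1 le_rfl (by omega)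
    have htk : ((l0 :: rest).drop 1).take ((min (PySem.List.len (l0 :: rest)) 2000).toNat - 1)
        = rest.take 1999 := by
      rw [List.drop_succ_cons, List.drop_zero]
      have : (min (PySem.List.len (l0 :: rest)) 2000).toNat - 1 = min rest.length 1999 := by
        rw [hlen] at *; omega
      rw [this, pv_take_min]
    rw [htk] at hfind
    simp only [Nat.cast_one] at hfind
    rw [hfind]
    cases hF : (rest.take 1999).findIdx? (fun l => PySem.Chars.strip l = pvDash) with
    | none => rfl
    | some k =>
      simp only [Option.bind_eq_bind, Option.bind_some, Option.pure_def, Option.map_some]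
      have hsl1 : PySem.List.slice (l0 :: rest) (some 1) (some ((1 : Int) + k)) = rest.take k := by
        have h1 : ((1 : Int) + k) = (((1 + k : Nat) : Int)) := by push_cast; ring
        rw [h1, show (1 : Int) = ((1 : Nat) : Int) from rfl, PySem.List.slice_natCast]
        simp
      have hsl2 : PySem.List.slice (l0 :: rest) (some ((1 : Int) + k + 1)) none = rest.drop (k + 1) := by
        rw [PySem.List.slice_from (l0 :: rest) (a := (1 : Int) + k + 1) (by omega)]
        have : ((1 : Int) + k + 1).toNat = k + 2 := by omega
        rw [this]
        rfl
      rw [hsl1, hsl2, pv_loop_eq, pv_rev_eq, pv_dedup_eq]
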